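-- pv_equiv track=rewrite | github.com/mmroch4/university | introduction-to-programming/exercises/39/index.py | count
-- ===== SOURCE A (Python) =====
-- def count(word, letters):
--   l = [a for a in letters]
--
--   counter = 0
--
--   for k in l:
--     for c in word:
--       if c == k:
--         counter += 1
--
--   return counter
-- ===== SOURCE B (Python) =====
-- def count(word, letters):
--   wc = {}
--   for c in word:
--     wc[c] = wc.get(c, 0) + 1
--   lc = {}
--   for c in letters:
--     lc[c] = lc.get(c, 0) + 1
--   return sum(n * lc.get(c, 0) for c, n in wc.items())
-- ===== Notes on version B (the rewrite author's own statement) =====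
-- stated objective: faster
-- what changed: Replaced A's nested per-letter rescans of word with two frequency tables built in one pass each, returning the dot product over word's distinct characters.
import Mathlib
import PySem

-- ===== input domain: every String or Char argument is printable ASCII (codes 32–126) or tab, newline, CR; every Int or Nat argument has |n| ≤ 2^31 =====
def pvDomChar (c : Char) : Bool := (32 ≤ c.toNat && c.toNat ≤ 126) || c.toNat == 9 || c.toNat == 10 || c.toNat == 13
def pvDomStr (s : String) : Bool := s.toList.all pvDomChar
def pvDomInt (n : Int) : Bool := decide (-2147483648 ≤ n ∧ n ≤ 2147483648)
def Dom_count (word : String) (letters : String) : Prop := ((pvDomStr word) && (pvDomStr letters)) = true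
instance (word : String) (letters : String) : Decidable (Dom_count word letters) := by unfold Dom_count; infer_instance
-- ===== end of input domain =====

-- B replaces A's nested letter-by-letter rescans of word with two one-pass frequency
-- tables and a dot product over word's distinct characters (faster, asymptotically).

-- ===== PORT A =====
def count (word : String) (letters : String) : Int :=
  let l := letters.toList
  l.foldl (fun counter k =>
    word.toList.foldl (fun counter c => if c == k then counter + 1 else counter) counter) 0

-- ===== PORT B =====
def count_alt (word : String) (letters : String) : Int :=
  let wc : PySem.Dict Char Int :=
    word.toList.foldl (fun d c => d.insert c (d.getD c 0 + 1)) PySem.Dict.empty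
  let lc : PySem.Dict Char Int :=
    letters.toList.foldl (fun d c => d.insert c (d.getD c 0 + 1)) PySem.Dict.empty
  wc.items.foldl (fun acc p => acc + p.2 * lc.getD p.1 0) 0

-- ===== PRECONDITION & SPEC =====
def Spec_count (word : String) (letters : String) (out : Int) : Prop := out = count_alt word letters
instance (word : String) (letters : String) (out : Int) : Decidable (Spec_count word letters out) := by unfold Spec_count; infer_instance

-- ===== CLAIM (what is proved, stated in full; the proofs are below) =====
def Claim_equal_count : Prop := ∀ (word : String) (letters : String), Dom_count word letters → Spec_count word letters (count word letters)

-- ===== LEMMAS AND PROOFS =====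

-- a fold 'acc + g x' is the accumulator plus the sum of g over the list
theorem pv_foldl_add_map {α : Type} (g : α → Int) (l : List α) (a : Int) :
    l.foldl (fun acc x => acc + g x) a = a + (l.map g).sum := by
  induction l generalizing a with
  | nil => simp
  | cons x xs ih => simp [List.foldl_cons, ih, add_assoc]

theorem pv_sum_if_eq (f : Char → Int) (S : List Char) (hS : S.Nodup) (x : Char) :
    (S.map (fun k => if k == x then f k else 0)).sum = if x ∈ S then f x else 0 := by
  induction S with
  | nil => simp
  | cons s S ih =>
    rcases List.nodup_cons.mp hS with ⟨hs, hS'⟩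
    rw [List.map_cons, List.sum_cons, ih hS']
    by_cases h : s = x
    · subst h
      simp [hs]
    · simp [List.mem_cons, h, Ne.symm h]

-- dot-product lemma: summing f over L equals summing f·(count in L) over a nodup
-- list S that contains every k with f k ≠ 0
theorem pv_dot (f : Char → Int) (S : List Char) (hS : S.Nodup)
    (hf : ∀ k, k ∉ S → f k = 0) (L : List Char) :
    (L.map f).sum = (S.map (fun k => f k * L.count k)).sum := by
  induction L with
  | nil => simp
  | cons x L ih =>
    have split : (S.map (fun k => f k * ((x :: L).count k : Int))).sum
        = (S.map (fun k => f k * (L.count k : Int))).sum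
          + (S.map (fun k => if k == x then f k else 0)).sum := by
      rw [← List.sum_map_add]
      apply congrArg
      apply List.map_congr_left
      intro k _
      simp only [List.count_cons]
      by_cases h : k = x
      · simp only [h, beq_self_eq_true, if_pos]
        push_cast
        ring
      · have hb : (k == x) = false := by simpa using h
        simp [hb]
        exact Or.inl fun e => h e.symm
    rw [List.map_cons, List.sum_cons, split, pv_sum_if_eq f S hS, ih]
    by_cases hx : x ∈ S
    · simp [hx, add_comm]
    · simp [hx, hf x hx, add_comm]

-- ===== VERDICT (by name: the statement is the Claim_ definition above) =====
theorem count_spec : Claim_equal_count := by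
  intro word letters _
  unfold Spec_count count count_alt
  set W := word.toList
  set L := letters.toList
  simp only [PySem.List.foldl_beq_add_one, PySem.Dict.foldl_insert_getD_add_one_eq_counter,
    PySem.Dict.items_counter]
  rw [pv_foldl_add_map (fun k => (W.count k : Int)) L 0,
      pv_foldl_add_map (fun p : Char × Int => p.2 * (PySem.Dict.counter L).getD p.1 0)]
  simp only [List.map_map, zero_add]
  rw [pv_dot (fun k => (W.count k : Int)) (PySem.Set.ofList W) (PySem.Set.nodup_ofList W)
      (by intro k hk; simp [PySem.Set.mem_ofList] at hk; simp [List.count_eq_zero_of_not_mem hk])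
      L]
  apply congrArg
  apply List.map_congr_left
  intro k _
  simp [PySem.Dict.getD_counter]
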